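-- pv_equiv track=rewrite | github.com/subrahamanya-Dhiomics/backend_digitalway | smb_phase1.py | get_required_columns
-- ===== SOURCE A (Python) =====
-- def get_required_columns(cols):
--     rem=['aprover1','aprover2','aprover3','sequence_id','active']
--
--     for r in rem:
--         try:
--          cols.remove(r)
--         except:
--             pass
--     return  cols
-- ===== SOURCE B (Python) =====
-- def get_required_columns(cols):
--     rem = {'aprover1', 'aprover2', 'aprover3', 'sequence_id', 'active'}
--     kept = []
--     for c in cols:
--         if c in rem:
--             rem.discard(c)   # drop only the first occurrence of each name
--         else:
--             kept.append(c)
--     cols[:] = kept           # mutate in place like A and return the same list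
--     return cols
-- ===== Notes on version B (the rewrite author's own statement) =====
-- stated objective: simpler
-- what changed: Instead of five passes each calling list.remove (a linear scan plus a linear shift) inside try/except, B does one left-to-right pass keeping elements and shrinking a removal set so only the first occurrence of each name is dropped, then assigns cols[:] in place.
import Mathlib
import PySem

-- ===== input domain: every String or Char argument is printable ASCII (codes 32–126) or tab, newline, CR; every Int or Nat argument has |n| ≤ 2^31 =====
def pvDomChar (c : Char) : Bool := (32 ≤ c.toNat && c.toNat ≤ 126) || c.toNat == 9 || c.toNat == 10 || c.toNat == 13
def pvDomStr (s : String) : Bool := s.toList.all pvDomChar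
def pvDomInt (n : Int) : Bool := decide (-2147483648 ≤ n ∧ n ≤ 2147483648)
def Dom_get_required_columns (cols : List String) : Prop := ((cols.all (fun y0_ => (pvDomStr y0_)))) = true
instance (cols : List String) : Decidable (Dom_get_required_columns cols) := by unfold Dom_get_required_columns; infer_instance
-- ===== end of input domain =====

-- B replaces A's five remove-with-try/except passes by one pass over cols with a
-- shrinking removal set (simpler, one traversal); both mutate cols in place in
-- Python — the equivalence proved here is about the return value.

-- ===== PORT A =====
-- cols.remove(r) inside try/except pass: remove first occurrence if present, else keep cols
def pvTryRemove (cs : List String) (r : String) : List String :=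
  match PySem.List.remove? cs r with
  | some cs' => cs'
  | none => cs

def get_required_columns (cols : List String) : List String :=
  ["aprover1", "aprover2", "aprover3", "sequence_id", "active"].foldl pvTryRemove cols

-- ===== PORT B =====
-- the single pass of Source B: keep c unless it is in rem, in which case discard it from rem
def pvKeep : List String → List String → List String
  | _, [] => []
  | rem, c :: cs =>
      if PySem.Set.contains rem c then pvKeep (PySem.Set.discard rem c) cs
      else c :: pvKeep rem cs

def get_required_columns_alt (cols : List String) : List String :=
  pvKeep (PySem.Set.ofList ["aprover1", "aprover2", "aprover3", "sequence_id", "active"]) cols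

-- ===== PRECONDITION & SPEC =====
def Spec_get_required_columns (cols : List String) (out : List String) : Prop := out = get_required_columns_alt cols
instance (cols : List String) (out : List String) : Decidable (Spec_get_required_columns cols out) := by unfold Spec_get_required_columns; infer_instance

-- ===== CLAIM (what is proved, stated in full; the proofs are below) =====
def Claim_equal_get_required_columns : Prop := ∀ (cols : List String), Dom_get_required_columns cols → Spec_get_required_columns cols (get_required_columns cols)

-- ===== LEMMAS AND PROOFS =====

theorem pvTryRemove_nil (r : String) : pvTryRemove [] r = [] := by
  simp [pvTryRemove, PySem.List.remove?]

theorem pvTryRemove_cons_self (c : String) (cs : List String) :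
    pvTryRemove (c :: cs) c = cs := by
  simp [pvTryRemove]

theorem pvTryRemove_cons_ne (c r : String) (cs : List String) (h : c ≠ r) :
    pvTryRemove (c :: cs) r = c :: pvTryRemove cs r := by
  simp only [pvTryRemove, PySem.List.remove?_cons_of_ne cs h]
  cases PySem.List.remove? cs r <;> simp

theorem remAll_nil (rem : List String) : rem.foldl pvTryRemove [] = [] := by
  induction rem with
  | nil => rfl
  | cons r rem ih => simpa [List.foldl, pvTryRemove_nil] using ih

theorem remAll_notmem (rem : List String) (c : String) (cs : List String) (h : c ∉ rem) :
    rem.foldl pvTryRemove (c :: cs) = c :: rem.foldl pvTryRemove cs := by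
  induction rem generalizing cs with
  | nil => rfl
  | cons r rem ih =>
      have hcr : c ≠ r := fun hh => h (by simp [hh])
      have h' : c ∉ rem := fun hh => h (List.mem_cons_of_mem _ hh)
      simp only [List.foldl, pvTryRemove_cons_ne c r cs hcr]
      exact ih _ h'

theorem remAll_discard (rem : List String) (c : String) (cs : List String)
    (hnd : rem.Nodup) (hc : c ∈ rem) :
    rem.foldl pvTryRemove (c :: cs) = (PySem.Set.discard rem c).foldl pvTryRemove cs := by
  induction rem generalizing cs with
  | nil => simp at hc
  | cons r rem ih =>
      by_cases hrc : r = c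
      · subst hrc
        have hnotin : r ∉ rem := (List.nodup_cons.mp hnd).1
        have : PySem.Set.discard (r :: rem) r = rem := by
          simp only [PySem.Set.discard, List.filter_cons]
          rw [if_neg (by simp)]
          apply List.filter_eq_self.mpr
          intro a ha
          have hane : a ≠ r := fun h => hnotin (h ▸ ha)
          simp [hane]
        rw [this]
        simp [List.foldl, pvTryRemove_cons_self]
      · have hc' : c ∈ rem := by
          rcases List.mem_cons.mp hc with h | h
          · exact absurd h.symm hrc
          · exact h
        have hdis : PySem.Set.discard (r :: rem) c = r :: PySem.Set.discard rem c := by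
          simp [PySem.Set.discard, hrc]
        rw [hdis]
        have hcr : c ≠ r := fun hh => hrc hh.symm
        simp only [List.foldl, pvTryRemove_cons_ne c r cs hcr]
        exact ih (pvTryRemove cs r) (List.nodup_cons.mp hnd).2 hc'

theorem remAll_eq_pvKeep (cols rem : List String) (hnd : rem.Nodup) :
    rem.foldl pvTryRemove cols = pvKeep rem cols := by
  induction cols generalizing rem with
  | nil => simp [remAll_nil, pvKeep]
  | cons c cs ih =>
      by_cases hc : c ∈ rem
      · rw [pvKeep, if_pos ((PySem.Set.contains_iff rem c).mpr hc), remAll_discard rem c cs hnd hc]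
        exact ih _ (by simpa [PySem.Set.discard] using hnd.filter _)
      · rw [pvKeep, if_neg (fun h => hc ((PySem.Set.contains_iff rem c).mp h)),
            remAll_notmem rem c cs hc]
        exact congrArg (c :: ·) (ih rem hnd)

-- ===== VERDICT (by name: the statement is the Claim_ definition above) =====
theorem get_required_columns_spec : Claim_equal_get_required_columns := by
  intro cols _
  show get_required_columns cols = get_required_columns_alt cols
  rw [get_required_columns, get_required_columns_alt,
      show PySem.Set.ofList ["aprover1", "aprover2", "aprover3", "sequence_id", "active"]
         = ["aprover1", "aprover2", "aprover3", "sequence_id", "active"] from by decide]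
  exact remAll_eq_pvKeep cols _ (by decide)
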